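-- pv_equiv track=rewrite | github.com/luffy06/ScheduleForCNN | main.py | subop
-- ===== SOURCE A (Python) =====
-- def subop(op):
--   res = ''
--   for i in op:
--     try:
--       int(i)
--     except Exception as e:
--       res = res + i
--     else:
--       break
--   return res
-- ===== SOURCE B (Python) =====
-- def subop(op):
--   # Return the leading run of non-digit characters: find the first digit
--   # and slice the prefix before it, instead of building an accumulator
--   # under try/except int().
--   for i, c in enumerate(op):
--     if '0' <= c <= '9':
--       return op[:i]
--   return op
-- ===== Notes on version B (the rewrite author's own statement) =====
-- stated objective: simpler
-- what changed: Replaces the try/except-int accumulator loop by an index scan for the first digit character followed by a single prefix slice (no exception handling, no repeated string concatenation).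
import Mathlib
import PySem

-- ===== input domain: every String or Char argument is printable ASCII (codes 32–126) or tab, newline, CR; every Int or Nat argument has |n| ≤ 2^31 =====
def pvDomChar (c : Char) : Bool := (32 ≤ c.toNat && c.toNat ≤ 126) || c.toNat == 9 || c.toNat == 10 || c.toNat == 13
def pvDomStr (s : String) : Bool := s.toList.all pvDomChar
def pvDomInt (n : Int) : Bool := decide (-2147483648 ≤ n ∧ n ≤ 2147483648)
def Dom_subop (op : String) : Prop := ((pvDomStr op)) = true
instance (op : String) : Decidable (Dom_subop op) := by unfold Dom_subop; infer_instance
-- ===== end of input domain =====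

-- B replaces A's try/except-int accumulator loop by an index scan for the first digit plus one prefix slice (simpler).


-- ===== PORT A =====
-- for i in op: try int(i) (PySem.Int.ofChars? [c] = int of the 1-char string) except: res = res + i; else: break
def subopGo : List Char → List Char → List Char
  | [], res => res
  | c :: rest, res =>
    match PySem.Int.ofChars? [c] with
    | some _ => res                      -- else: break
    | none => subopGo rest (res ++ [c])  -- except: res = res + i

def subop (op : String) : String := String.ofList (subopGo op.toList [])

-- ===== PORT B =====
-- for i, c in enumerate(op): if '0' <= c <= '9': return op[:i]  (i ≥ 0, so op[:i] = take i); return op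
def subopAltGo (op : String) : List Char → Nat → String
  | [], _ => op
  | c :: rest, i =>
    if ('0' ≤ c && c ≤ '9') then String.ofList (op.toList.take i)
    else subopAltGo op rest (i + 1)

def subop_alt (op : String) : String := subopAltGo op op.toList 0

-- ===== PRECONDITION & SPEC =====
def Spec_subop (op : String) (out : String) : Prop := out = subop_alt op
instance (op : String) (out : String) : Decidable (Spec_subop op out) := by unfold Spec_subop; infer_instance

-- ===== CLAIM (what is proved, stated in full; the proofs are below) =====
def Claim_equal_subop : Prop := ∀ (op : String), Dom_subop op → Spec_subop op (subop op)

-- ===== LEMMAS AND PROOFS =====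

-- On ASCII-range chars, int() on the 1-char string succeeds exactly for '0'..'9'.
set_option maxRecDepth 8000 in
theorem ofChars_single_range : ∀ n ∈ List.range 128,
    (PySem.Int.ofChars? [Char.ofNat n]).isSome = ('0' ≤ Char.ofNat n && Char.ofNat n ≤ '9') := by
  decide

theorem ofChars_single (c : Char) (h : pvDomChar c = true) :
    (PySem.Int.ofChars? [c]).isSome = ('0' ≤ c && c ≤ '9') := by
  have hlt : c.toNat < 128 := by
    simp [pvDomChar] at h
    omega
  have := ofChars_single_range c.toNat (List.mem_range.mpr hlt)
  simpa using this

theorem subopGo_eq (l : List Char) : ∀ (op : String) (i : Nat),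
    (∀ c ∈ l, pvDomChar c = true) →
    op.toList.drop i = l →
    String.ofList (subopGo l (op.toList.take i)) = subopAltGo op l i := by
  induction l with
  | nil =>
    intro op i _ hdrop
    have hlen : op.toList.length ≤ i := by
      have h0 : (op.toList.drop i).length = 0 := by rw [hdrop]; rfl
      simp only [List.length_drop] at h0
      omega
    simp [subopGo, subopAltGo, List.take_of_length_le hlen]
  | cons c rest ih =>
    intro op i hdom hdrop
    have hc := ofChars_single c (hdom c (by simp))
    by_cases hd : ('0' ≤ c && c ≤ '9') = true
    · rw [hd] at hc
      obtain ⟨v, hv⟩ := Option.isSome_iff_exists.mp hc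
      simp [subopGo, subopAltGo, hv, hd]
    · have hd' : ('0' ≤ c && c ≤ '9') = false := by simpa using hd
      rw [hd'] at hc
      have hnone : PySem.Int.ofChars? [c] = none := Option.not_isSome_iff_eq_none.mp (by simp [hc])
      have hget : op.toList[i]? = some c := by
        rw [← List.head?_drop, hdrop]; rfl
      have hdrop' : op.toList.drop (i + 1) = rest := by
        have : op.toList.drop (i + 1) = (op.toList.drop i).tail := by
          rw [← List.drop_drop]; simp
        rw [this, hdrop]; rfl
      have htake : op.toList.take (i + 1) = op.toList.take i ++ [c] := by
        rw [List.take_add_one, hget]; rfl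
      simp only [subopGo, subopAltGo, hnone, hd', Bool.false_eq_true, if_false]
      rw [← htake]
      exact ih op (i + 1) (fun x hx => hdom x (by simp [hx])) hdrop'

-- ===== VERDICT (by name: the statement is the Claim_ definition above) =====
theorem subop_spec : Claim_equal_subop := by
  intro op hdom
  unfold Spec_subop subop subop_alt
  have hd : ∀ c ∈ op.toList, pvDomChar c = true := by
    intro c hc
    exact List.all_eq_true.mp hdom c hc
  have := subopGo_eq op.toList op 0 hd (by simp)
  simpa using this
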